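-- pv_equiv track=rewrite | github.com/SakkarinK/Algorithm-coding | Lab3.py | greedyNum
-- ===== SOURCE A (Python) =====
-- def greedyNum(arr, k):
--     i = 0
--     p = 0 ##passenger index
--     g = 0 ##grab index
--     pick = 0 ##count output
--     pas = [] ##passenger
--     grab = [] ##grab
--
--     ##find P,G and put in list sepertately
--     while i < len(arr):
--         if arr[i] == 'G':
--             grab.append(i)
--         elif arr[i] == 'P':
--             pas.append(i)
--         i += 1
--
--     ##find whether grab can pick up passenger
--     while p < len(pas) and g < len(grab):
--         if (abs(pas[p] - grab[g]) <= k): #grab and passenger are not too far from each other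
--             pick += 1 #can pick
--             p += 1
--             g += 1
--
--         elif pas[p] < grab[g]:
--             p += 1
--         else:
--             g += 1
--
--     return pick
-- ===== SOURCE B (Python) =====
-- def greedyNum(arr, k):
--     # One streaming pass: keep a queue of unmatched indices (all of one kind);
--     # match with the opposite kind within distance k, evicting stale fronts.
--     pick = 0
--     pending = []   # unmatched indices, all of kind `kind`, increasing
--     kind = ''
--     for i, c in enumerate(arr):
--         if c != 'P' and c != 'G':
--             continue
--         if pending and kind != c:
--             while pending and i - pending[0] > k:
--                 pending.pop(0)
--             if pending:
--                 pick += 1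
--                 pending.pop(0)
--             else:
--                 pending.append(i)
--                 kind = c
--         else:
--             pending.append(i)
--             kind = c
--     return pick
-- ===== Notes on version B (the rewrite author's own statement) =====
-- stated objective: alternative
-- what changed: B replaces A's two-phase algorithm (build separate sorted P and G index lists, then a two-pointer merge) with a single streaming pass over arr that keeps one queue of pending unmatched indices of one kind, evicting fronts farther than k and matching the front against each arriving opposite-kind index.
import Mathlib
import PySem

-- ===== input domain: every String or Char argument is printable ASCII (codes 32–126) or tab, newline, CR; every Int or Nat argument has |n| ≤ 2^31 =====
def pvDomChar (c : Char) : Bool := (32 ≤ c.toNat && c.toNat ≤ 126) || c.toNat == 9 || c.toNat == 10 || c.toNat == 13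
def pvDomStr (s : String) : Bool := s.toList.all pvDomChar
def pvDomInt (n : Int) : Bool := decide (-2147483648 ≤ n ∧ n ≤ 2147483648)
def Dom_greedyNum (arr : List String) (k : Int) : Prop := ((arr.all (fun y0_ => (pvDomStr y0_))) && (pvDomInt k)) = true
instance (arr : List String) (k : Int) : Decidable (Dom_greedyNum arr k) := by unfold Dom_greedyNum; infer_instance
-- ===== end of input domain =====

-- B is a single streaming pass with one pending queue instead of A's build-two-lists-then-two-pointer-merge; objective: alternative decomposition (same cost).

-- ===== PORT A =====
-- first while loop of A: collect indices of 'P' and 'G' in scan order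
def pvBuild (pg : List Int × List Int) (e : Int × String) : List Int × List Int :=
  if e.2 = "G" then (pg.1, pg.2 ++ [e.1])
  else if e.2 = "P" then (pg.1 ++ [e.1], pg.2)
  else pg

-- second while loop of A: two-pointer merge (advancing an index = dropping the head)
def pvMergeA (k : Int) : List Int → List Int → Int
  | [], _ => 0
  | _ :: _, [] => 0
  | p :: ps, g :: gs =>
    if |p - g| ≤ k then 1 + pvMergeA k ps gs
    else if p < g then pvMergeA k ps (g :: gs)
    else pvMergeA k (p :: ps) gs
termination_by a b => a.length + b.length

def greedyNum (arr : List String) (k : Int) : Int :=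
  let pg := (PySem.List.enumerate arr).foldl pvBuild ([], [])
  pvMergeA k pg.1 pg.2

-- ===== PORT B =====
-- B's inner while loop: evict stale fronts of the pending queue
def pvEvict (i k : Int) : List Int → List Int
  | [] => []
  | x :: xs => if i - x > k then pvEvict i k xs else x :: xs

-- B's loop body: state = (pick, pending queue, kind of the pending indices)
def pvStep (k : Int) : (Int × List Int × String) → (Int × String) → (Int × List Int × String)
  | (pick, pend, kind), (i, c) =>
    if c ≠ "P" ∧ c ≠ "G" then (pick, pend, kind)
    else if pend ≠ [] ∧ kind ≠ c then
      match pvEvict i k pend with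
      | [] => (pick, [i], c)
      | _ :: rest => (pick + 1, rest, kind)
    else (pick, pend ++ [i], c)

def greedyNum_alt (arr : List String) (k : Int) : Int :=
  ((PySem.List.enumerate arr).foldl (pvStep k) (0, [], "")).1

-- ===== PRECONDITION & SPEC =====
def Spec_greedyNum (arr : List String) (k : Int) (out : Int) : Prop := out = greedyNum_alt arr k
instance (arr : List String) (k : Int) (out : Int) : Decidable (Spec_greedyNum arr k out) := by unfold Spec_greedyNum; infer_instance

-- ===== CLAIM (what is proved, stated in full; the proofs are below) =====
def Claim_equal_greedyNum : Prop := ∀ (arr : List String) (k : Int), Dom_greedyNum arr k → Spec_greedyNum arr k (greedyNum arr k)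

-- ===== LEMMAS AND PROOFS =====

def futP (es : List (Int × String)) : List Int :=
  es.filterMap (fun e => if e.2 = "P" then some e.1 else none)
def futG (es : List (Int × String)) : List Int :=
  es.filterMap (fun e => if e.2 = "G" then some e.1 else none)

theorem build_eq (es : List (Int × String)) : ∀ (a b : List Int),
    es.foldl pvBuild (a, b) = (a ++ futP es, b ++ futG es) := by
  induction es with
  | nil => intro a b; simp [futP, futG]
  | cons e tl ih =>
    intro a b
    obtain ⟨i, c⟩ := e
    by_cases hg : c = "G"
    · simp [pvBuild, futP, futG, hg, ih]
    · by_cases hp : c = "P"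
      · simp [pvBuild, futP, futG, hp, ih]
      · simp [pvBuild, futP, futG, hg, hp, ih]

theorem mergeA_nil_right (k : Int) (xs : List Int) : pvMergeA k xs [] = 0 := by
  cases xs <;> simp [pvMergeA]

theorem evict_sublist (i k : Int) : ∀ (l : List Int), ∀ x ∈ pvEvict i k l, x ∈ l := by
  intro l
  induction l with
  | nil => simp [pvEvict]
  | cons a tl ih =>
    intro x hx
    simp only [pvEvict] at hx
    split at hx
    · exact List.mem_cons_of_mem _ (ih x hx)
    · exact hx

theorem evict_head (i k : Int) : ∀ (l : List Int) (p : Int) (rest : List Int),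
    pvEvict i k l = p :: rest → i - p ≤ k := by
  intro l
  induction l with
  | nil => intro p rest h; simp [pvEvict] at h
  | cons a tl ih =>
    intro p rest h
    simp only [pvEvict] at h
    split at h
    · exact ih p rest h
    · rename_i hc
      obtain ⟨rfl, rfl⟩ : a = p ∧ tl = rest := by simpa using h
      omega

theorem merge_evictP (k i : Int) (X Y : List Int) :
    ∀ (pend : List Int), (∀ p ∈ pend, p < i) →
    pvMergeA k (pend ++ X) (i :: Y) = pvMergeA k (pvEvict i k pend ++ X) (i :: Y) := by
  intro pend
  induction pend with
  | nil => intro _; rfl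
  | cons p ps ih =>
    intro hb
    have hpi : p < i := hb p (List.mem_cons_self ..)
    by_cases hev : i - p > k
    · have h1 : ¬ |p - i| ≤ k := by rw [abs_sub_comm, abs_of_pos (by omega)]; omega
      simp only [pvEvict, if_pos hev, List.cons_append, pvMergeA, if_neg h1, if_pos hpi]
      exact ih (fun q hq => hb q (List.mem_cons_of_mem _ hq))
    · simp [pvEvict, hev]

theorem merge_evictG (k i : Int) (X Y : List Int) :
    ∀ (pend : List Int), (∀ g ∈ pend, g < i) →
    pvMergeA k (i :: X) (pend ++ Y) = pvMergeA k (i :: X) (pvEvict i k pend ++ Y) := by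
  intro pend
  induction pend with
  | nil => intro _; rfl
  | cons g gs ih =>
    intro hb
    have hgi : g < i := hb g (List.mem_cons_self ..)
    by_cases hev : i - g > k
    · have h1 : ¬ |i - g| ≤ k := by rw [abs_of_pos (by omega)]; omega
      have h2 : ¬ i < g := by omega
      simp only [pvEvict, if_pos hev, List.cons_append, pvMergeA, if_neg h1, if_neg h2]
      exact ih (fun q hq => hb q (List.mem_cons_of_mem _ hq))
    · simp [pvEvict, hev]

theorem pv_inv (k : Int) (es : List (Int × String)) :
    ∀ (pick : Int) (pend : List Int) (kind : String),
    (pend ≠ [] → kind = "P" ∨ kind = "G") →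
    (∀ x ∈ pend, ∀ e ∈ es, x < e.1) →
    es.Pairwise (fun a b => a.1 < b.1) →
    (es.foldl (pvStep k) (pick, pend, kind)).1
      = pick + pvMergeA k (if kind = "P" then pend ++ futP es else futP es)
                          (if kind = "G" then pend ++ futG es else futG es) := by
  induction es with
  | nil =>
    intro pick pend kind _ _ _
    simp only [List.foldl_nil, futP, futG, List.filterMap_nil]
    split_ifs with h1 h2
    · exact absurd (h1 ▸ h2) (by decide)
    · simp [mergeA_nil_right]
    · simp [pvMergeA]
    · simp [pvMergeA]
  | cons e tl ih =>
    intro pick pend kind hk hb hpw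
    obtain ⟨i, c⟩ := e
    have hpw' : tl.Pairwise (fun a b => a.1 < b.1) := hpw.of_cons
    have hilt : ∀ e' ∈ tl, i < e'.1 := by
      intro e' he'; exact (List.pairwise_cons.mp hpw).1 e' he'
    have hbtl : ∀ x ∈ pend, ∀ e' ∈ tl, x < e'.1 :=
      fun x hx e' he' => hb x hx e' (List.mem_cons_of_mem _ he')
    have hbi : ∀ x ∈ pend, x < i := fun x hx => hb x hx (i, c) (List.mem_cons_self ..)
    by_cases hc : c ≠ "P" ∧ c ≠ "G"
    · -- skipped character
      have hfp : futP ((i, c) :: tl) = futP tl := by simp [futP, hc.1]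
      have hfg : futG ((i, c) :: tl) = futG tl := by simp [futG, hc.2]
      simp only [List.foldl_cons, pvStep, if_pos hc, hfp, hfg]
      exact ih pick pend kind hk hbtl hpw'
    · have hc' : c = "P" ∨ c = "G" := by
        rcases not_and_or.mp hc with h | h
        exacts [Or.inl (not_not.mp h), Or.inr (not_not.mp h)]
      by_cases hm : pend ≠ [] ∧ kind ≠ c
      · -- opposite kind arrives: evict, then match or start new queue
        obtain ⟨hpne, hkc⟩ := hm
        have hkinds : (kind = "P" ∧ c = "G") ∨ (kind = "G" ∧ c = "P") := by
          rcases hk hpne with h | h <;> rcases hc' with h2 | h2 <;> simp_all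
        simp only [List.foldl_cons, pvStep, if_neg hc, if_pos (And.intro hpne hkc)]
        rcases hkinds with ⟨hkP, hcG⟩ | ⟨hkG, hcP⟩
        · -- pending passengers, a 'G' arrives
          have hfp : futP ((i, c) :: tl) = futP tl := by simp [futP, hcG]
          have hfg : futG ((i, c) :: tl) = i :: futG tl := by simp [futG, hcG]
          rw [hfp, hfg, if_pos hkP, if_neg (by rw [hkP]; decide),
            merge_evictP k i (futP tl) (futG tl) pend hbi]
          rcases hev : pvEvict i k pend with _ | ⟨p, rest⟩
          · show (List.foldl (pvStep k) (pick, [i], c) tl).1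
              = pick + pvMergeA k ([] ++ futP tl) (i :: futG tl)
            have := ih pick [i] c
              (fun _ => by rcases hc' with h | h; exacts [Or.inl h, Or.inr h])
              (by intro x hx e' he'; simp at hx; subst hx; exact hilt e' he') hpw'
            rw [this, if_neg (by rw [hcG]; decide), if_pos hcG]
            simp
          · show (List.foldl (pvStep k) (pick + 1, rest, kind) tl).1
              = pick + pvMergeA k (p :: rest ++ futP tl) (i :: futG tl)
            have hple : i - p ≤ k := evict_head i k pend p rest hev
            have hpi : p < i := hbi p (evict_sublist i k pend p (hev ▸ List.mem_cons_self ..))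
            have habs : |p - i| ≤ k := by rw [abs_sub_comm, abs_of_pos (by omega)]; omega
            have hrest : ∀ x ∈ rest, ∀ e' ∈ tl, x < e'.1 := by
              intro x hx e' he'
              exact hbtl x (evict_sublist i k pend x (hev ▸ List.mem_cons_of_mem _ hx)) e' he'
            have := ih (pick + 1) rest kind (fun _ => hk hpne) hrest hpw'
            rw [this, List.cons_append, pvMergeA, if_pos habs, if_pos hkP,
              if_neg (by rw [hkP]; decide)]
            ring
        · -- pending grabs, a 'P' arrives
          have hfp : futP ((i, c) :: tl) = i :: futP tl := by simp [futP, hcP]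
          have hfg : futG ((i, c) :: tl) = futG tl := by simp [futG, hcP]
          rw [hfp, hfg, if_pos hkG, if_neg (by rw [hkG]; decide),
            merge_evictG k i (futP tl) (futG tl) pend hbi]
          rcases hev : pvEvict i k pend with _ | ⟨g, rest⟩
          · show (List.foldl (pvStep k) (pick, [i], c) tl).1
              = pick + pvMergeA k (i :: futP tl) ([] ++ futG tl)
            have := ih pick [i] c
              (fun _ => by rcases hc' with h | h; exacts [Or.inl h, Or.inr h])
              (by intro x hx e' he'; simp at hx; subst hx; exact hilt e' he') hpw'
            rw [this, if_pos hcP, if_neg (by rw [hcP]; decide)]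
            simp
          · show (List.foldl (pvStep k) (pick + 1, rest, kind) tl).1
              = pick + pvMergeA k (i :: futP tl) (g :: rest ++ futG tl)
            have hgle : i - g ≤ k := evict_head i k pend g rest hev
            have hgi : g < i := hbi g (evict_sublist i k pend g (hev ▸ List.mem_cons_self ..))
            have habs : |i - g| ≤ k := by rw [abs_of_pos (by omega)]; omega
            have hrest : ∀ x ∈ rest, ∀ e' ∈ tl, x < e'.1 := by
              intro x hx e' he'
              exact hbtl x (evict_sublist i k pend x (hev ▸ List.mem_cons_of_mem _ hx)) e' he'
            have := ih (pick + 1) rest kind (fun _ => hk hpne) hrest hpw'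
            rw [this, List.cons_append, pvMergeA, if_pos habs, if_neg (by rw [hkG]; decide),
              if_pos hkG]
            ring
      · -- same kind (or empty queue): append i to the pending queue
        have hm' : pend = [] ∨ kind = c := by
          rcases not_and_or.mp hm with h | h
          exacts [Or.inl (not_not.mp h), Or.inr (not_not.mp h)]
        simp only [List.foldl_cons, pvStep, if_neg hc, if_neg hm]
        have hbnew : ∀ x ∈ pend ++ [i], ∀ e' ∈ tl, x < e'.1 := by
          intro x hx e' he'
          rcases List.mem_append.mp hx with h | h
          · exact hbtl x h e' he'
          · simp at h; subst h; exact hilt e' he'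
        rw [ih pick (pend ++ [i]) c
          (fun _ => by rcases hc' with h | h; exacts [Or.inl h, Or.inr h]) hbnew hpw']
        rcases hc' with hcP | hcG
        · have hfp : futP ((i, c) :: tl) = i :: futP tl := by simp [futP, hcP]
          have hfg : futG ((i, c) :: tl) = futG tl := by simp [futG, hcP]
          rw [hfp, hfg, if_pos hcP, if_neg (by rw [hcP]; decide)]
          rcases hm' with hpe | hkc
          · subst hpe
            rcases eq_or_ne kind "P" with h | h
            · simp [h]
            · rw [if_neg h]
              rcases eq_or_ne kind "G" with h2 | h2 <;> simp [h2]
          · rw [hkc, if_pos hcP, if_neg (by rw [hcP]; decide)]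
            simp
        · have hfp : futP ((i, c) :: tl) = futP tl := by simp [futP, hcG]
          have hfg : futG ((i, c) :: tl) = i :: futG tl := by simp [futG, hcG]
          rw [hfp, hfg, if_neg (by rw [hcG]; decide), if_pos hcG]
          rcases hm' with hpe | hkc
          · subst hpe
            rcases eq_or_ne kind "G" with h | h
            · simp [h]
            · rw [if_neg h]
              rcases eq_or_ne kind "P" with h2 | h2 <;> simp [h2]
          · rw [hkc, if_neg (by rw [hcG]; decide), if_pos hcG]
            simp

-- ===== VERDICT (by name: the statement is the Claim_ definition above) =====
theorem greedyNum_spec : Claim_equal_greedyNum := by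
  intro arr k _
  unfold Spec_greedyNum greedyNum greedyNum_alt
  rw [show ((PySem.List.enumerate arr).foldl pvBuild ([], []) : List Int × List Int)
        = ([] ++ futP (PySem.List.enumerate arr), [] ++ futG (PySem.List.enumerate arr)) from build_eq _ [] []]
  have h := pv_inv k (PySem.List.enumerate arr) 0 [] ""
    (by simp) (by simp) (PySem.List.pairwise_lt_enumerate arr 0)
  simp at h ⊢
  rw [h]
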